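-- pv_equiv track=rewrite | github.com/ranjanikrishnan/Coding-Challenges | hackerrank/sustainable_power/sustainable_power.py | findMaximumSustainableClusterSize
-- ===== SOURCE A (Python) =====
-- def isSustainable(processingPower, bootingPower, powerMax):
--     max_booting = max(bootingPower)
--     sum_processing = sum(processingPower)
--     k = len(processingPower)
--
--     return ((max_booting + sum_processing) * k) <= powerMax
--
-- def findMaximumSustainableClusterSize(processingPower, bootingPower, powerMax):
--     # Write your code here
--     n = len(processingPower)
--     max_cluster_size = 0
--
--     for i in range(n):
--         for j in range(i, n):
--             sustainable = isSustainable(processingPower[i:j+1], bootingPower[i:j+1], powerMax)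
--             if sustainable and max_cluster_size <= abs(i-(j+1)):
--                 max_cluster_size = abs(i-(j+1))
--
--     return max_cluster_size
-- ===== SOURCE B (Python) =====
-- def findMaximumSustainableClusterSize(processingPower, bootingPower, powerMax):
--     n = len(processingPower)
--     best = 0
--     for i in range(n):
--         m = bootingPower[i]
--         s = 0
--         for j in range(i, n):
--             if bootingPower[j] > m:
--                 m = bootingPower[j]
--             s += processingPower[j]
--             k = j - i + 1
--             if (m + s) * k <= powerMax and best <= k:
--                 best = k
--     return best
-- ===== Notes on version B (the rewrite author's own statement) =====
-- stated objective: faster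
-- what changed: replaces the triple-nested slice/max/sum re-scan per (i,j) pair with a single incremental running-max and running-sum maintained while extending the window, removing the inner O(n) scan
import Mathlib
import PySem

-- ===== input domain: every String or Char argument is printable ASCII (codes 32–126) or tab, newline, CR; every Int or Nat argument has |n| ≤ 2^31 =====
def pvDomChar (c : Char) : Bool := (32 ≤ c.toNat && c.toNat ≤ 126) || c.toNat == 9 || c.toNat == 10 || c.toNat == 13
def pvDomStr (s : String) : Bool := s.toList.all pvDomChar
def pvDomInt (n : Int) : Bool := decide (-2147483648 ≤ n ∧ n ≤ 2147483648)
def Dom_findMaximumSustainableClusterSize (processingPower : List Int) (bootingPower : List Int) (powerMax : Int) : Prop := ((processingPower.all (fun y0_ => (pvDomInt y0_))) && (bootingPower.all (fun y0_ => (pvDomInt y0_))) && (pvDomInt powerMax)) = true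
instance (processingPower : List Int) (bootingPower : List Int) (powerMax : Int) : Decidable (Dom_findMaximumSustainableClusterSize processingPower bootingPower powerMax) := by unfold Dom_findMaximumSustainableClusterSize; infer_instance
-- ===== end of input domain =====

-- B replaces A's per-window re-scan (slice + max() + sum() for every pair (i, j)) by one incremental
-- running max and running sum maintained while the window is extended (objective: faster).

-- ===== PORT A =====
-- Python's isSustainable; max() raises ValueError on an empty list — Pre_ excludes exactly those
-- inputs, so the `.getD 0` default is never reached inside Pre_.
def isSustainable (processingPower bootingPower : List Int) (powerMax : Int) : Bool :=
  let max_booting := (PySem.List.max? bootingPower (fun y => y)).getD 0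
  let sum_processing := processingPower.sum
  let k : Int := processingPower.length
  decide ((max_booting + sum_processing) * k ≤ powerMax)

-- A's inner loop body: `for j in range(i, n): …`
def pvInnerA (processingPower bootingPower : List Int) (powerMax i : Int) (mcs : Int) (j : Int) : Int :=
  let sustainable := isSustainable (PySem.List.slice processingPower (some i) (some (j + 1)))
                                   (PySem.List.slice bootingPower (some i) (some (j + 1))) powerMax
  if sustainable && decide (mcs ≤ |i - (j + 1)|) then |i - (j + 1)| else mcs

def findMaximumSustainableClusterSize (processingPower bootingPower : List Int) (powerMax : Int) : Int :=
  let n : Int := processingPower.length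
  (PySem.List.pyRange 0 n 1).foldl
    (fun mcs i =>
      (PySem.List.pyRange i n 1).foldl (pvInnerA processingPower bootingPower powerMax i) mcs)
    0

-- ===== PORT B =====
-- B's inner loop body; state (best, m, s): best answer so far, running max of bootingPower and
-- running sum of processingPower over the current window [i, j].
def pvInnerB (processingPower bootingPower : List Int) (powerMax i : Int) (st : Int × Int × Int) (j : Int) : Int × Int × Int :=
  let m := if PySem.List.pyGetD bootingPower j 0 > st.2.1 then PySem.List.pyGetD bootingPower j 0 else st.2.1
  let s := st.2.2 + PySem.List.pyGetD processingPower j 0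
  let k := j - i + 1
  let best := if (m + s) * k ≤ powerMax ∧ st.1 ≤ k then k else st.1
  (best, m, s)

def findMaximumSustainableClusterSize_alt (processingPower bootingPower : List Int) (powerMax : Int) : Int :=
  let n : Int := processingPower.length
  (PySem.List.pyRange 0 n 1).foldl
    (fun best i =>
      ((PySem.List.pyRange i n 1).foldl (pvInnerB processingPower bootingPower powerMax i)
        (best, PySem.List.pyGetD bootingPower i 0, 0)).1)
    0

-- ===== PRECONDITION & SPEC =====
-- A raises ValueError (max() of an empty slice) exactly when bootingPower is shorter than a
-- non-empty processingPower, and B raises IndexError there too; Pre_ excludes exactly those inputs.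
def Pre_findMaximumSustainableClusterSize (processingPower : List Int) (bootingPower : List Int) (powerMax : Int) : Prop :=
  processingPower.length ≤ bootingPower.length
instance (processingPower : List Int) (bootingPower : List Int) (powerMax : Int) : Decidable (Pre_findMaximumSustainableClusterSize processingPower bootingPower powerMax) := by unfold Pre_findMaximumSustainableClusterSize; infer_instance

def pvWitness_findMaximumSustainableClusterSize : List Int × List Int × Int := ([1, 2], [3, 1], 20)

def Spec_findMaximumSustainableClusterSize (processingPower : List Int) (bootingPower : List Int) (powerMax : Int) (out : Int) : Prop := out = findMaximumSustainableClusterSize_alt processingPower bootingPower powerMax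
instance (processingPower : List Int) (bootingPower : List Int) (powerMax : Int) (out : Int) : Decidable (Spec_findMaximumSustainableClusterSize processingPower bootingPower powerMax out) := by unfold Spec_findMaximumSustainableClusterSize; infer_instance

-- ===== CLAIM (what is proved, stated in full; the proofs are below) =====
def Claim_equal_findMaximumSustainableClusterSize : Prop := ∀ (processingPower : List Int) (bootingPower : List Int) (powerMax : Int), Dom_findMaximumSustainableClusterSize processingPower bootingPower powerMax → Pre_findMaximumSustainableClusterSize processingPower bootingPower powerMax → Spec_findMaximumSustainableClusterSize processingPower bootingPower powerMax (findMaximumSustainableClusterSize processingPower bootingPower powerMax)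

-- ===== LEMMAS AND PROOFS =====

-- B's `m` at entry to inner iteration j: the max of bootingPower over the window [i, j)
-- (taken as b[i] for j = i — exactly B's initial value).
def pvM (b : List Int) (i j : Nat) : Int :=
  List.foldl max (b.getD i 0) ((b.drop (i + 1)).take (j - i - 1))
-- B's `s` at entry to inner iteration j: the sum of processingPower over [i, j)
def pvS (p : List Int) (i j : Nat) : Int :=
  ((p.drop i).take (j - i)).sum

theorem pvM_step (b : List Int) (i j : Nat) (hij : i ≤ j) (hj : j < b.length) :
    pvM b i (j + 1) = max (pvM b i j) (b.getD j 0) := by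
  unfold pvM
  rcases Nat.eq_or_lt_of_le hij with h | h
  · subst h; simp [List.getD, List.getElem?_eq_getElem hj]
  · have h1 : j + 1 - i - 1 = (j - i - 1) + 1 := by omega
    have hd : i + 1 + (j - i - 1) = j := by omega
    rw [h1, List.take_add_one, List.foldl_append, List.getElem?_drop, hd,
      List.getElem?_eq_getElem hj]
    simp [List.getD, List.getElem?_eq_getElem hj]

theorem pvS_step (p : List Int) (i j : Nat) (hij : i ≤ j) (hj : j < p.length) :
    pvS p i (j + 1) = pvS p i j + p.getD j 0 := by
  unfold pvS
  have h1 : j + 1 - i = (j - i) + 1 := by omega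
  have hd : i + (j - i) = j := by omega
  rw [h1, List.take_add_one, List.getElem?_drop, hd, List.getElem?_eq_getElem hj]
  simp [List.getD, List.getElem?_eq_getElem hj]

theorem pv_slice_b (b : List Int) (i j : Nat) (hij : i ≤ j) (hib : i < b.length) :
    PySem.List.slice b (some (i : Int)) (some ((j : Int) + 1))
      = b.getD i 0 :: (b.drop (i + 1)).take (j - i) := by
  have hc : ((j : Int) + 1) = ((j + 1 : Nat) : Int) := by push_cast; ring
  rw [hc, PySem.List.slice_natCast, List.drop_eq_getElem_cons hib]
  have h1 : j + 1 - i = (j - i) + 1 := by omega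
  rw [h1, List.take_succ_cons]
  simp [List.getD, List.getElem?_eq_getElem hib]

theorem pv_max_slice (b : List Int) (i j : Nat) (hij : i ≤ j) (hib : i < b.length) :
    (PySem.List.max? (PySem.List.slice b (some (i : Int)) (some ((j : Int) + 1))) (fun y => y)).getD 0
      = pvM b i (j + 1) := by
  rw [pv_slice_b b i j hij hib, PySem.List.max?_id_cons]
  unfold pvM
  have h1 : j + 1 - i - 1 = j - i := by omega
  rw [h1]
  simp

theorem pv_sum_slice (p : List Int) (i j : Nat) :
    (PySem.List.slice p (some (i : Int)) (some ((j : Int) + 1))).sum = pvS p i (j + 1) := by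
  have hc : ((j : Int) + 1) = ((j + 1 : Nat) : Int) := by push_cast; ring
  rw [hc, PySem.List.slice_natCast]
  rfl

theorem pv_len_slice (p : List Int) (i j : Nat) (hij : i ≤ j) (hj : j < p.length) :
    ((PySem.List.slice p (some (i : Int)) (some ((j : Int) + 1))).length : Int)
      = (j : Int) - (i : Int) + 1 := by
  have hc : ((j : Int) + 1) = ((j + 1 : Nat) : Int) := by push_cast; ring
  rw [hc, PySem.List.slice_natCast]
  simp [List.length_take, List.length_drop]
  omega

-- one inner iteration: B's body simulates A's body and restores the (pvM, pvS) invariant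
theorem pv_step (p b : List Int) (pm : Int) (i j : Nat) (hb : p.length ≤ b.length)
    (hij : i ≤ j) (hj : j < p.length) (mcs : Int) :
    pvInnerB p b pm (i : Int) (mcs, pvM b i j, pvS p i j) (j : Int)
      = (pvInnerA p b pm (i : Int) mcs (j : Int), pvM b i (j + 1), pvS p i (j + 1)) := by
  have hib : i < b.length := by omega
  have hjb : j < b.length := by omega
  have habs : |(i : Int) - ((j : Int) + 1)| = (j : Int) - (i : Int) + 1 := by
    rw [abs_of_nonpos (by omega)]; ring
  have hm : (if PySem.List.pyGetD b (j : Int) 0 > pvM b i j then PySem.List.pyGetD b (j : Int) 0 else pvM b i j)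
      = pvM b i (j + 1) := by
    rw [pvM_step b i j hij hjb]
    simp only [PySem.List.pyGetD_natCast]
    rcases le_or_gt (b.getD j 0) (pvM b i j) with h | h
    · rw [if_neg (by omega), max_eq_left h]
    · rw [if_pos (by omega), max_eq_right (le_of_lt h)]
  unfold pvInnerB pvInnerA isSustainable
  simp only [PySem.List.pyGetD_natCast] at hm ⊢
  rw [hm, pv_max_slice b i j hij hib, pv_sum_slice p i j, pv_len_slice p i j hij hj,
    ← pvS_step p i j hij hj, habs]
  simp only [decide_eq_true_eq, Bool.and_eq_true]

-- the whole inner loop, by downward induction on n - j with the state invariant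
theorem pv_inner_eq (p b : List Int) (pm : Int) (i : Nat) (hb : p.length ≤ b.length) :
    ∀ (j : Nat), i ≤ j → j ≤ p.length → ∀ (mcs : Int),
    (PySem.List.pyRange (j : Int) (p.length : Int) 1).foldl (pvInnerA p b pm (i : Int)) mcs
      = ((PySem.List.pyRange (j : Int) (p.length : Int) 1).foldl (pvInnerB p b pm (i : Int))
          (mcs, pvM b i j, pvS p i j)).1 := by
  intro j
  induction hn : p.length - j generalizing j with
  | zero =>
    intro hij hjn mcs
    have : j = p.length := by omega
    subst this
    rw [PySem.List.pyRange_one_eq_nil (le_refl _)]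
    simp
  | succ k ih =>
    intro hij hjn mcs
    have hj : j < p.length := by omega
    rw [PySem.List.pyRange_one_cons (by exact_mod_cast hj)]
    simp only [List.foldl_cons]
    rw [pv_step p b pm i j hb hij hj mcs]
    have hc : ((j : Int) + 1) = ((j + 1 : Nat) : Int) := by push_cast; ring
    rw [hc]
    exact ih (j + 1) (by omega) (by omega) (by omega) _

theorem pv_outer_eq (p b : List Int) (pm : Int) (hb : p.length ≤ b.length) :
    findMaximumSustainableClusterSize p b pm = findMaximumSustainableClusterSize_alt p b pm := by
  unfold findMaximumSustainableClusterSize findMaximumSustainableClusterSize_alt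
  apply PySem.List.foldl_congr_mem
  intro best i hi
  rw [PySem.List.mem_pyRange_one] at hi
  obtain ⟨h0, hn⟩ := hi
  obtain ⟨k, rfl⟩ : ∃ k : Nat, i = (k : Int) := ⟨i.toNat, (Int.toNat_of_nonneg h0).symm⟩
  have hk : k < p.length := by exact_mod_cast hn
  have hM : pvM b k k = PySem.List.pyGetD b (k : Int) 0 := by
    unfold pvM; simp [List.getD]
  have hS : pvS p k k = 0 := by unfold pvS; simp
  rw [← hM, ← hS]
  exact pv_inner_eq p b pm k hb k le_rfl (le_of_lt hk) best

-- ===== VERDICT (by name: the statement is the Claim_ definition above) =====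
theorem findMaximumSustainableClusterSize_spec : Claim_equal_findMaximumSustainableClusterSize := by
  intro p b pm _ hpre
  unfold Spec_findMaximumSustainableClusterSize
  exact pv_outer_eq p b pm hpre
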